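-- pv_equiv track=rewrite | github.com/Halkov12/HillelHW | hw19/task.py | dep_point
-- ===== SOURCE A (Python) =====
-- def dep_point(points):
--     n = len(points)
--     if n < 3:
--         return 0
--
--     max_left = [0] * n
--     max_right = [0] * n
--
--     max_left[0] = points[0]
--     for i in range(1, n):
--         max_left[i] = max(max_left[i - 1], points[i])
--
--     max_right[n - 1] = points[n - 1]
--     for i in range(n - 2, -1, -1):
--         max_right[i] = max(max_right[i + 1], points[i])
--
--     max_depth = 0
--     for i in range(1, n - 1):
--         water_level = min(max_left[i], max_right[i])
--         depth = water_level - points[i]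
--         if depth > max_depth:
--             max_depth = depth
--
--     return max_depth
-- ===== SOURCE B (Python) =====
-- def dep_point(points):
--     n = len(points)
--     if n < 3:
--         return 0
--     l, r = 0, n - 1
--     lm, rm = points[0], points[n - 1]
--     best = 0
--     while l < r:
--         if lm <= rm:
--             l += 1
--             x = points[l]
--             if x > lm:
--                 lm = x
--             else:
--                 best = max(best, lm - x)
--         else:
--             r -= 1
--             x = points[r]
--             if x > rm:
--                 rm = x
--             else:
--                 best = max(best, rm - x)
--     return best
-- ===== Notes on version B (the rewrite author's own statement) =====
-- stated objective: faster
-- what changed: Replaced the two prefix/suffix max arrays and three passes with the classic two-pointer converging scan that keeps only running left/right maxima in O(1) extra memory.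
import Mathlib
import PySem

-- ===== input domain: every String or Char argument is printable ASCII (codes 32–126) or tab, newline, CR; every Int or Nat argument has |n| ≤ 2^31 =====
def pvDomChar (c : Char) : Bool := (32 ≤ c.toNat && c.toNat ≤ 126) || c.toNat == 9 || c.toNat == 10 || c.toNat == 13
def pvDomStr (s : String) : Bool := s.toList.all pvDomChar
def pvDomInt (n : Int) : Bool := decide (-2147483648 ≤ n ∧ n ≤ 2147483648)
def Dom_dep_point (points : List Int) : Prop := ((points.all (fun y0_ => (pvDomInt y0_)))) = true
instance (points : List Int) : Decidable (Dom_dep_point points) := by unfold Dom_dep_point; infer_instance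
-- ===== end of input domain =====

-- B replaces A's two prefix/suffix max arrays and three passes by the two-pointer
-- converging scan with O(1) extra memory (objective: alternative algorithm, same O(n) time).

-- ===== PORT A =====
-- loop `for i in range(1, n): max_left[i] = max(max_left[i-1], points[i])`
-- (the list assignments build the list left to right; all indices are in range, so getD is exact)
def pvLeftLoop (p : List Int) (n : Nat) (i : Nat) (acc : List Int) : List Int :=
  if _h : i < n then
    pvLeftLoop p n (i + 1) (acc ++ [max (acc.getD (i - 1) 0) (p.getD i 0)])
  else acc
  termination_by n - i

-- loop `for i in range(n-2, -1, -1): max_right[i] = max(max_right[i+1], points[i])`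
-- (builds the list right to left by prepending; acc's head is max_right[i+1])
def pvRightLoop (p : List Int) : Nat → List Int → List Int
  | 0, acc => max (acc.headD 0) (p.getD 0 0) :: acc
  | i + 1, acc => pvRightLoop p i (max (acc.headD 0) (p.getD (i + 1) 0) :: acc)

-- loop `for i in range(1, n-1): … if depth > max_depth: max_depth = depth`
def pvDepthLoop (p ml mr : List Int) (n : Nat) (i : Nat) (best : Int) : Int :=
  if _h : i < n - 1 then
    let depth := min (ml.getD i 0) (mr.getD i 0) - p.getD i 0
    pvDepthLoop p ml mr n (i + 1) (if depth > best then depth else best)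
  else best
  termination_by n - 1 - i

def dep_point (points : List Int) : Int :=
  let n := points.length
  if n < 3 then 0
  else
    let maxLeft := pvLeftLoop points n 1 [points.getD 0 0]
    let maxRight := pvRightLoop points (n - 2) [points.getD (n - 1) 0]
    pvDepthLoop points maxLeft maxRight n 1 0

-- ===== PORT B =====
-- the `while l < r` two-pointer loop of Source B (indices stay in range, so getD is exact)
def pvTwoPtr (p : List Int) (l r : Nat) (lm rm best : Int) : Int :=
  if _h : l < r then
    if lm ≤ rm then
      let x := p.getD (l + 1) 0
      if x > lm then pvTwoPtr p (l + 1) r x rm best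
      else pvTwoPtr p (l + 1) r lm rm (max best (lm - x))
    else
      let x := p.getD (r - 1) 0
      if x > rm then pvTwoPtr p l (r - 1) lm x best
      else pvTwoPtr p l (r - 1) lm rm (max best (rm - x))
  else best
  termination_by r - l

def dep_point_alt (points : List Int) : Int :=
  let n := points.length
  if n < 3 then 0
  else pvTwoPtr points 0 (n - 1) (points.getD 0 0) (points.getD (n - 1) 0) 0

-- ===== PRECONDITION & SPEC =====
def Spec_dep_point (points : List Int) (out : Int) : Prop := out = dep_point_alt points
instance (points : List Int) (out : Int) : Decidable (Spec_dep_point points out) := by unfold Spec_dep_point; infer_instance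

-- ===== CLAIM (what is proved, stated in full; the proofs are below) =====
def Claim_equal_dep_point : Prop := ∀ (points : List Int), Dom_dep_point points → Spec_dep_point points (dep_point points)

-- ===== LEMMAS AND PROOFS =====

-- running maximum of points[0..i]
def lmaxF (p : List Int) : Nat → Int
  | 0 => p.getD 0 0
  | i + 1 => max (lmaxF p i) (p.getD (i + 1) 0)

-- running maximum of points[i..n-1]
def rmaxF (p : List Int) (i : Nat) : Int :=
  if _h : p.length - 1 ≤ i then p.getD (p.length - 1) 0
  else max (rmaxF p (i + 1)) (p.getD i 0)
  termination_by p.length - 1 - i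

def Dv (p : List Int) (j : Nat) : Int := min (lmaxF p j) (rmaxF p j) - p.getD j 0

-- best depth over the open interval (l, r)
def Sv (p : List Int) (l r : Nat) : Int :=
  (List.range' (l + 1) (r - l - 1)).foldl (fun b j => max b (Dv p j)) 0

theorem rmax_last (p : List Int) (i : Nat) (h : p.length - 1 ≤ i) :
    rmaxF p i = p.getD (p.length - 1) 0 := by
  rw [rmaxF]; simp [h]

theorem rmax_step (p : List Int) (i : Nat) (h : i < p.length - 1) :
    rmaxF p i = max (rmaxF p (i + 1)) (p.getD i 0) := by
  rw [rmaxF]; simp [Nat.not_le.mpr h]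

theorem rmax_succ_le (p : List Int) (i : Nat) : rmaxF p (i + 1) ≤ rmaxF p i := by
  by_cases h : p.length - 1 ≤ i
  · rw [rmax_last p i h, rmax_last p (i + 1) (le_trans h (Nat.le_succ i))]
  · rw [rmax_step p i (Nat.not_le.mp h)]; exact le_max_left _ _

theorem rmax_anti (p : List Int) {i j : Nat} (h : i ≤ j) : rmaxF p j ≤ rmaxF p i := by
  induction j with
  | zero => simp_all
  | succ k ih =>
    rcases Nat.le_succ_iff.mp h with h' | h'
    · exact le_trans (rmax_succ_le p k) (ih h')
    · exact h' ▸ le_refl _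

theorem lmax_mono (p : List Int) {i j : Nat} (h : i ≤ j) : lmaxF p i ≤ lmaxF p j := by
  induction j with
  | zero => simp_all
  | succ k ih =>
    rcases Nat.le_succ_iff.mp h with h' | h'
    · exact le_trans (ih h') (le_max_left _ _)
    · subst h'; exact le_refl _

theorem foldl_max_init (g : Nat → Int) (xs : List Nat) (b : Int) :
    ∀ c, xs.foldl (fun a j => max a (g j)) (max b c) = max b (xs.foldl (fun a j => max a (g j)) c) := by
  induction xs with
  | nil => intro c; rfl
  | cons x xs ih =>
    intro c
    simp only [List.foldl_cons]
    rw [max_assoc, ih (max c (g x))]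

theorem le_foldl_max (g : Nat → Int) (xs : List Nat) :
    ∀ b : Int, b ≤ xs.foldl (fun a j => max a (g j)) b := by
  induction xs with
  | nil => intro b; exact le_refl b
  | cons x xs ih => intro b; exact le_trans (le_max_left b (g x)) (ih _)

theorem Sv_nonneg (p : List Int) (l r : Nat) : 0 ≤ Sv p l r := le_foldl_max _ _ 0

theorem Sv_empty (p : List Int) (l r : Nat) (h : r ≤ l + 1) : Sv p l r = 0 := by
  unfold Sv
  have : r - l - 1 = 0 := by omega
  rw [this]; rfl

theorem Sv_left (p : List Int) (l r : Nat) (h : l + 1 < r) :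
    Sv p l r = max (Dv p (l + 1)) (Sv p (l + 1) r) := by
  unfold Sv
  have h1 : r - l - 1 = (r - (l + 1) - 1) + 1 := by omega
  rw [h1, List.range'_succ, List.foldl_cons]
  have h2 : (max 0 (Dv p (l + 1))) = max (Dv p (l + 1)) 0 := max_comm _ _
  rw [h2, foldl_max_init]

theorem Sv_right (p : List Int) (l r : Nat) (h : l + 1 < r) :
    Sv p l r = max (Sv p l (r - 1)) (Dv p (r - 1)) := by
  unfold Sv
  have h1 : r - l - 1 = ((r - 1) - l - 1) + 1 := by omega
  have h2 : List.range' (l + 1) (((r - 1) - l - 1) + 1) =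
      List.range' (l + 1) ((r - 1) - l - 1) ++ [r - 1] := by
    have h3 := List.range'_concat (s := l + 1) (n := (r - 1) - l - 1) (step := 1)
    rw [show l + 1 + 1 * ((r - 1) - l - 1) = r - 1 by omega] at h3
    exact h3
  rw [h1, h2, List.foldl_append]
  rfl

-- ===== A's characterisation =====

theorem leftLoop_getD (p : List Int) (n : Nat) :
    ∀ k i acc, 1 ≤ i → n ≤ i + k → acc.length = i →
      (∀ j, j < i → acc.getD j 0 = lmaxF p j) →
      ∀ j, j < n ∨ j < i → (pvLeftLoop p n i acc).getD j 0 = lmaxF p j := by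
  intro k
  induction k with
  | zero =>
    intro i acc hi hk hlen hval j hj
    rw [pvLeftLoop]
    simp only [show ¬ i < n by omega, dif_neg, not_false_iff]
    exact hval j (by omega)
  | succ k ih =>
    intro i acc hi hk hlen hval j hj
    rw [pvLeftLoop]
    by_cases h : i < n
    · simp only [h, dif_pos]
      have hnew : acc ++ [max (acc.getD (i - 1) 0) (p.getD i 0)] = acc ++ [lmaxF p i] := by
        rw [hval (i - 1) (by omega)]
        rw [show i = (i - 1) + 1 by omega]
        simp [lmaxF]
      rw [hnew]
      refine ih (i + 1) _ (by omega) (by omega) (by simp [hlen]) ?_ j (by omega)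
      intro j' hj'
      by_cases hji : j' < i
      · rw [show ((acc ++ [lmaxF p i]).getD j' 0 : Int) = acc.getD j' 0 by
          simp [List.getD, List.getElem?_append_left (by omega : j' < acc.length)]]
        exact hval j' hji
      · have hj'i : j' = i := by omega
        subst hj'i
        rw [show j' = acc.length from hlen.symm]
        simp [List.getD]
    · simp only [h, dif_neg, not_false_iff]
      exact hval j (by omega)

theorem rightLoop_eq (p : List Int) :
    ∀ i acc, i + 1 ≤ p.length - 1 → acc.headD 0 = rmaxF p (i + 1) →
      pvRightLoop p i acc = (List.range' 0 (i + 1)).map (rmaxF p) ++ acc := by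
  intro i
  induction i with
  | zero =>
    intro acc hn hhead
    simp only [pvRightLoop, hhead]
    rw [← rmax_step p 0 (by omega)]
    rfl
  | succ k ih =>
    intro acc hn hhead
    simp only [pvRightLoop, hhead]
    rw [← rmax_step p (k + 1) (by omega)]
    rw [ih (rmaxF p (k + 1) :: acc) (by omega) (by simp)]
    have : List.range' 0 (k + 1 + 1) = List.range' 0 (k + 1) ++ [k + 1] := by
      have := List.range'_concat (s := 0) (n := k + 1) (step := 1)
      simpa using this
    rw [this]
    simp

theorem depthLoop_eq (p ml mr : List Int) (n : Nat) :
    ∀ k i best, n - 1 ≤ i + k → pvDepthLoop p ml mr n i best =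
      (List.range' i (n - 1 - i)).foldl
        (fun b j => max b (min (ml.getD j 0) (mr.getD j 0) - p.getD j 0)) best := by
  intro k
  induction k with
  | zero =>
    intro i best hk
    rw [pvDepthLoop]
    simp only [show ¬ i < n - 1 by omega, dif_neg, not_false_iff]
    rw [show n - 1 - i = 0 by omega]
    rfl
  | succ k ih =>
    intro i best hk
    rw [pvDepthLoop]
    by_cases h : i < n - 1
    · simp only [h, dif_pos]
      rw [show n - 1 - i = (n - 1 - (i + 1)) + 1 by omega, List.range'_succ, List.foldl_cons]
      rw [ih (i + 1) _ (by omega)]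
      congr 1
      rw [max_def]
      split_ifs <;> omega
    · simp only [h, dif_neg, not_false_iff]
      rw [show n - 1 - i = 0 by omega]
      rfl

theorem map_rmax_getD (p : List Int) (m : Nat) (t : List Int) :
    ∀ j, j < m → (((List.range' 0 m).map (rmaxF p)) ++ t).getD j 0 = rmaxF p j := by
  intro j hj
  have hlen : j < ((List.range' 0 m).map (rmaxF p)).length := by simpa using hj
  rw [show ((((List.range' 0 m).map (rmaxF p)) ++ t).getD j 0 : Int)
        = ((List.range' 0 m).map (rmaxF p)).getD j 0 by
    simp [List.getD, List.getElem?_append_left hlen]]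
  simp [List.getD, List.getElem?_eq_getElem hlen, List.getElem_range']

-- A = Sv 0 (n-1)
theorem dep_point_eq_S (p : List Int) (h : ¬ p.length < 3) :
    dep_point p = Sv p 0 (p.length - 1) := by
  have h3 : 3 ≤ p.length := by omega
  unfold dep_point
  simp only [h, if_neg, not_false_iff]
  have hL := leftLoop_getD p p.length p.length 1 [p.getD 0 0] (le_refl 1) (by omega) rfl
    (by intro j hj
        have hj0 : j = 0 := by omega
        subst hj0
        simp [lmaxF])
  have hhead : ([p.getD (p.length - 1) 0] : List Int).headD 0 = rmaxF p ((p.length - 2) + 1) := by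
    rw [show (p.length - 2) + 1 = p.length - 1 by omega, rmax_last p _ (le_refl _)]
    rfl
  have hR := rightLoop_eq p (p.length - 2) [p.getD (p.length - 1) 0] (by omega) hhead
  rw [hR, depthLoop_eq p _ _ p.length p.length 1 0 (by omega)]
  have hcong := PySem.List.foldl_congr_mem
    (l := List.range' 1 (p.length - 1 - 1)) (init := (0 : Int))
    (f := fun b j => max b
      (min ((pvLeftLoop p p.length 1 [p.getD 0 0]).getD j 0)
        ((List.map (rmaxF p) (List.range' 0 (p.length - 2 + 1)) ++ [p.getD (p.length - 1) 0]).getD j 0)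
        - p.getD j 0))
    (g := fun b j => max b (Dv p j))
    (by intro acc j hj
        have hj' := List.mem_range'_1.mp hj
        dsimp only
        rw [hL j (Or.inl (by omega)), map_rmax_getD p (p.length - 2 + 1) _ j (by omega)]
        rfl)
  rw [hcong]
  unfold Sv
  norm_num

-- ===== B's characterisation =====

theorem twoPtr_eq (p : List Int) :
    ∀ fuel l r lm rm best, r - l ≤ fuel → 3 ≤ p.length → r ≤ p.length - 1 → l ≤ r →
      lm = lmaxF p l → rm = rmaxF p r → 0 ≤ best →
      (l = 0 ∨ Dv p l ≤ best) → (r = p.length - 1 ∨ Dv p r ≤ best) →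
      pvTwoPtr p l r lm rm best = max best (Sv p l r) := by
  intro fuel
  induction fuel with
  | zero =>
    intro l r lm rm best hfuel h3 hr hlr hlm hrm hb hL hR
    rw [pvTwoPtr]
    simp only [show ¬ l < r by omega, dif_neg, not_false_iff]
    rw [Sv_empty p l r (by omega), max_eq_left hb]
  | succ fuel ih =>
    intro l r lm rm best hfuel h3 hr hlr hlm hrm hb hL hR
    rw [pvTwoPtr]
    by_cases hlt : l < r
    · simp only [hlt, dif_pos]
      by_cases hc : lm ≤ rm
      · -- advance the left pointer
        simp only [hc, if_pos]
        have hlm1 : lmaxF p (l + 1) = max lm (p.getD (l + 1) 0) := by rw [hlm]; rfl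
        have hrm_ge : lm ≤ rmaxF p (l + 1) := by
          have := rmax_anti p (show l + 1 ≤ r by omega)
          rw [← hrm] at this
          omega
        by_cases hx : p.getD (l + 1) 0 > lm
        · simp only [hx, if_pos]
          have hD0 : Dv p (l + 1) ≤ 0 := by
            unfold Dv
            have hmin := min_le_left (lmaxF p (l + 1)) (rmaxF p (l + 1))
            rw [hlm1, max_eq_right (le_of_lt hx)] at hmin
            omega
          rw [ih (l + 1) r (p.getD (l + 1) 0) rm best (by omega) h3 hr (by omega)
            (by rw [hlm1, max_eq_right (le_of_lt hx)]) hrm hb (Or.inr (le_trans hD0 hb))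
            hR]
          by_cases hter : l + 1 < r
          · rw [Sv_left p l r hter, max_eq_right (le_trans hD0 (Sv_nonneg p (l + 1) r))]
          · rw [Sv_empty p l r (by omega), Sv_empty p (l + 1) r (by omega)]
        · simp only [hx, if_neg, not_false_iff]
          have hxle : p.getD (l + 1) 0 ≤ lm := by omega
          have hlm2 : lmaxF p (l + 1) = lm := by rw [hlm1, max_eq_left hxle]
          have hDle : Dv p (l + 1) ≤ lm - p.getD (l + 1) 0 := by
            unfold Dv
            have hmin := min_le_left (lmaxF p (l + 1)) (rmaxF p (l + 1))
            rw [hlm2] at hmin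
            omega
          rw [ih (l + 1) r lm rm (max best (lm - p.getD (l + 1) 0)) (by omega) h3 hr
            (by omega) hlm2.symm hrm (le_trans hb (le_max_left _ _))
            (Or.inr (le_trans hDle (le_max_right _ _)))
            (by rcases hR with h' | h'
                · exact Or.inl h'
                · exact Or.inr (le_trans h' (le_max_left _ _)))]
          by_cases hter : l + 1 < r
          · have hDeq : Dv p (l + 1) = lm - p.getD (l + 1) 0 := by
              unfold Dv
              rw [hlm2, min_eq_left hrm_ge]
            rw [Sv_left p l r hter, hDeq, max_assoc]
          · -- meeting point: the contribution at r is already dominated by best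
            have hreq : r = l + 1 := by omega
            have hle : lm - p.getD (l + 1) 0 ≤ best := by
              by_cases hrn : r = p.length - 1
              · have hl1 : l + 1 = p.length - 1 := by omega
                have h1 : rm = p.getD (l + 1) 0 := by
                  rw [hrm, hrn, rmax_last p _ (le_refl _), ← hl1]
                omega
              · rcases hR with h' | h'
                · exact absurd h' hrn
                · rw [hreq] at h'
                  unfold Dv at h'
                  have hrm' : rmaxF p (l + 1) = rm := by rw [← hreq, ← hrm]
                  rw [hlm2, hrm', min_eq_left hc] at h'
                  exact h'
            rw [Sv_empty p l r (by omega), Sv_empty p (l + 1) r (by omega),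
              max_eq_left (le_trans hb (le_max_left _ _)), max_eq_left hle, max_eq_left hb]
      · -- advance the right pointer
        simp only [hc, if_neg, not_false_iff]
        have hc' : rm < lm := by omega
        have hrm1 : rmaxF p (r - 1) = max rm (p.getD (r - 1) 0) := by
          have h0 := rmax_step p (r - 1) (by omega)
          rw [show r - 1 + 1 = r by omega] at h0
          rw [h0, hrm]
        have hlm_ge : rm < lmaxF p (r - 1) := by
          have := lmax_mono p (show l ≤ r - 1 by omega)
          rw [← hlm] at this
          omega
        by_cases hx : p.getD (r - 1) 0 > rm
        · simp only [hx, if_pos]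
          have hD0 : Dv p (r - 1) ≤ 0 := by
            unfold Dv
            have hmin := min_le_right (lmaxF p (r - 1)) (rmaxF p (r - 1))
            rw [hrm1, max_eq_right (le_of_lt hx)] at hmin
            omega
          rw [ih l (r - 1) lm (p.getD (r - 1) 0) best (by omega) h3 (by omega) (by omega)
            hlm (by rw [hrm1, max_eq_right (le_of_lt hx)]) hb hL
            (Or.inr (le_trans hD0 hb))]
          by_cases hter : l + 1 < r
          · rw [Sv_right p l r hter, max_eq_left (le_trans hD0 (Sv_nonneg p l (r - 1)))]
          · rw [Sv_empty p l r (by omega), Sv_empty p l (r - 1) (by omega)]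
        · simp only [hx, if_neg, not_false_iff]
          have hxle : p.getD (r - 1) 0 ≤ rm := by omega
          have hrm2 : rmaxF p (r - 1) = rm := by rw [hrm1, max_eq_left hxle]
          have hDle : Dv p (r - 1) ≤ rm - p.getD (r - 1) 0 := by
            unfold Dv
            have hmin := min_le_right (lmaxF p (r - 1)) (rmaxF p (r - 1))
            rw [hrm2] at hmin
            omega
          rw [ih l (r - 1) lm rm (max best (rm - p.getD (r - 1) 0)) (by omega) h3
            (by omega) (by omega) hlm hrm2.symm (le_trans hb (le_max_left _ _))
            (by rcases hL with h' | h'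
                · exact Or.inl h'
                · exact Or.inr (le_trans h' (le_max_left _ _)))
            (Or.inr (le_trans hDle (le_max_right _ _)))]
          by_cases hter : l + 1 < r
          · have hDeq : Dv p (r - 1) = rm - p.getD (r - 1) 0 := by
              unfold Dv
              rw [hrm2, min_eq_right (le_of_lt hlm_ge)]
            rw [Sv_right p l r hter, hDeq, max_assoc,
              max_comm (rm - p.getD (r - 1) 0) (Sv p l (r - 1))]
          · -- meeting point: the contribution at l is already dominated by best
            have hreq : r - 1 = l := by omega
            have hle : rm - p.getD (r - 1) 0 ≤ best := by
              rcases hL with h' | h'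
              · exfalso
                have hx0 : p.getD (r - 1) 0 = lm := by
                  rw [hreq, hlm, h']
                  rfl
                omega
              · have hDl : Dv p l = rm - p.getD (r - 1) 0 := by
                  unfold Dv
                  rw [← hreq, hrm2, min_eq_right (le_of_lt hlm_ge)]
                omega
            rw [Sv_empty p l r (by omega), Sv_empty p l (r - 1) (by omega),
              max_eq_left (le_trans hb (le_max_left _ _)), max_eq_left hle, max_eq_left hb]
    · simp only [hlt, dif_neg, not_false_iff]
      rw [Sv_empty p l r (by omega), max_eq_left hb]

theorem dep_point_alt_eq_S (p : List Int) (h : ¬ p.length < 3) :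
    dep_point_alt p = Sv p 0 (p.length - 1) := by
  unfold dep_point_alt
  simp only [h, if_neg, not_false_iff]
  rw [twoPtr_eq p (p.length - 1) 0 (p.length - 1) (p.getD 0 0) (p.getD (p.length - 1) 0) 0
    (by omega) (by omega) (le_refl _) (by omega) rfl (rmax_last p _ (le_refl _)).symm
    (le_refl 0) (Or.inl rfl) (Or.inl rfl)]
  exact max_eq_right (Sv_nonneg p 0 (p.length - 1))

-- ===== VERDICT (by name: the statement is the Claim_ definition above) =====
theorem dep_point_spec : Claim_equal_dep_point := by
  intro points _
  unfold Spec_dep_point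
  by_cases h : points.length < 3
  · simp [dep_point, dep_point_alt, h]
  · rw [dep_point_eq_S points h, dep_point_alt_eq_S points h]
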